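-- pv_equiv track=rewrite | github.com/liboyin/algo-prac | max_reservoir_above_hist.py | search
-- ===== SOURCE A (Python) =====
-- from math import ceil, log2
--
-- class SumTree:  # ref: max_rectangle_under_hist.MinIndexRangeTree
--     def __init__(self, arr):  # O(n) time & space
--         def build(left, right, i):
--             if left == right:
--                 a[i] = arr[left]
--                 return a[i]
--             mid = (left + right) // 2
--             left = build(left, mid, i * 2 + 1)  # recursive call
--             right = build(mid + 1, right, i * 2 + 2)  # recursive call
--             a[i] = left + right
--             return a[i]
--         self.n = len(arr)
--         h = ceil(log2(self.n))
--         a = [None] * (2 * 2 ** h - 1)  # list[num]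
--         build(0, self.n - 1, 0)
--         self.a = a
--         self.cache = dict()  # dict[tuple[int,int], num]: query cache
--
--     def get_sum(self, left, right):  # returns sum(arr[left:right+1]). O(\log^h n) time
--         def query(sl, sr, i):  # sl: slice left; sr: slice right
--             if sr < sl or right < sl or sr < left:
--                 return 0
--             if left <= sl and sr <= right:  # queried range covers the current slice
--                 return self.a[i]
--             mid = (sl + sr) // 2
--             q_left = query(sl, mid, i * 2 + 1)  # recursive call
--             q_right = query(mid + 1, sr, i * 2 + 2)  # recursive call
--             return q_left + q_right
--         if (left, right) in self.cache:
--             return self.cache[(left, right)]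
--         r = query(0, self.n - 1, 0)
--         self.cache[(left, right)] = r
--         return r
--
-- def next_geq(arr):  # ref: next_greater.py
--     s = [0]
--     r = [None] * len(arr)
--     for i, x in enumerate(arr[1:], start=1):
--         while len(s) > 0 and arr[s[-1]] <= x:
--             r[s.pop()] = i
--         s.append(i)
--     return r
--
-- def search(hist):
--     def qrs(i, j):  # safely query range sum
--         if 0 <= i < n and 0 <= j < n and i <= j:
--             return st.get_sum(i, j)
--         return 0
--     def volume(i):
--         j_left = left_geq[i]  # j_left: index of the first geq on the left
--         v_left = 0 if j_left is None else (i - j_left - 1) * min(hist[j_left], hist[i]) - qrs(j_left + 1, i - 1)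
--         # i - j_left - 1: number of gaps between j_left and i (exclusive); qrs(j_left + 1, i - 1): sum(hist[j_left+1:i])
--         j_right = right_geq[i]  # j_right: index of the first geq on the right
--         v_right = 0 if j_right is None else (j_right - i - 1) * min(hist[j_right], hist[i]) - qrs(i + 1, j_right - 1)
--         # j_right - i - 1: number of gaps between i and j_right (exclusive); qrs(i + 1, j_right - 1): sum(hist[i+1:j_right])
--         return max(v_left, v_right)
--     n = len(hist)
--     if n <= 1:
--         return 0
--     left_geq = next_geq(hist[::-1])
--     left_geq.reverse()
--     for i, x in enumerate(left_geq):
--         if x is not None: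
--             left_geq[i] = n - 1 - x  # undo reverse for each element
--     right_geq = next_geq(hist)  # for all i except i == n - 1, right_geq[i] is not None
--     st = SumTree(hist)
--     return max(volume(i) for i in range(n))
-- ===== SOURCE B (Python) =====
-- # B: same reservoir maximum, but range sums come from a prefix-sum array (O(1) per query)
-- # instead of A's segment tree, and the maximum is kept in a running accumulator; O(n) total.
--
-- def next_geq(arr):  # same stack helper as A: first index to the right with a >= value
--     s = [0]
--     r = [None] * len(arr)
--     for i, x in enumerate(arr[1:], start=1):
--         while len(s) > 0 and arr[s[-1]] <= x:
--             r[s.pop()] = i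
--         s.append(i)
--     return r
--
-- def search(hist):
--     n = len(hist)
--     if n <= 1:
--         return 0
--     prefix = [0]                      # prefix[k] = sum(hist[:k])
--     for x in hist:
--         prefix.append(prefix[-1] + x)
--     left_raw = next_geq(hist[::-1])   # nearest >= to the left, via the reversed scan
--     left_raw.reverse()
--     right_geq = next_geq(hist)
--     best = 0
--     for i in range(n):
--         jl = left_raw[i]
--         if jl is not None:
--             j = n - 1 - jl            # undo the reversal
--             vl = (i - j - 1) * min(hist[j], hist[i]) - (prefix[i] - prefix[j + 1])
--             if vl > best:
--                 best = vl
--         jr = right_geq[i]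
--         if jr is not None:
--             vr = (jr - i - 1) * min(hist[jr], hist[i]) - (prefix[jr] - prefix[i + 1])
--             if vr > best:
--                 best = vr
--     return best
-- ===== Notes on version B (the rewrite author's own statement) =====
-- stated objective: faster
-- what changed: The segment tree (recursive build + O(log n) range-sum queries with a cache) is replaced by a one-pass prefix-sum array giving each range sum in O(1), and the max-over-generator becomes a running accumulator.
import Mathlib
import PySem

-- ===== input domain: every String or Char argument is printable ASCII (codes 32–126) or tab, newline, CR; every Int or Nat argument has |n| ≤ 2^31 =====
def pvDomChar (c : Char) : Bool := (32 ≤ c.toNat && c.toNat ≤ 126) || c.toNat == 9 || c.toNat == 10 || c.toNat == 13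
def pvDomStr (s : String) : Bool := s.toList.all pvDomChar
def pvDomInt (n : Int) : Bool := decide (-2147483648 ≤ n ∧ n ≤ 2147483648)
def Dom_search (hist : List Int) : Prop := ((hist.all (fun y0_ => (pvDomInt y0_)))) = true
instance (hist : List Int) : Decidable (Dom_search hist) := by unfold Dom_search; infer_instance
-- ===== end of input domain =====

-- B replaces A's segment tree (recursive build, O(log n) cached range-sum queries) by a
-- one-pass prefix-sum array with O(1) range sums, and folds the maximum in one accumulator.

-- ===== PORT A =====

-- next_geq (identical helper in Source A and Source B).  The Python stack `s` (append/pop at the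
-- end) is the head of this list; `r[s.pop()] = i` is the pySetD; pushed indices are ≥ 0
-- and in range, so `arr[s[-1]]` is the in-range read pyGetD models exactly.
def ngPop (arr : List Int) (x i : Int) : List Int → List (Option Int) → List Int × List (Option Int)
  | [], r => ([], r)
  | t :: s, r =>
    if PySem.List.pyGetD arr t 0 ≤ x then          -- while len(s) > 0 and arr[s[-1]] <= x
      ngPop arr x i s (PySem.List.pySetD r t (some i))
    else (t :: s, r)

def nextGeq (arr : List Int) : List (Option Int) :=
  ((PySem.List.enumerate (arr.drop 1) 1).foldl     -- for i, x in enumerate(arr[1:], start=1)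
    (fun st p =>
      let q := ngPop arr p.2 p.1 st.1 st.2
      (p.1 :: q.1, q.2))
    ([0], List.replicate arr.length (none : Option Int))).2

-- SumTree.__init__/build.  The Python backing list a (size 2*2**ceil(log2 n)-1, which the
-- recursion never exceeds) is modelled as a total function Int → Option Int, every cell
-- initially None exactly as in Python; fuel bounds the recursion depth (the Python
-- recursion always terminates, so the fuel-0 branch is unreachable on every real call).
def stBuild (arr : List Int) : Nat → Int → Int → Int → (Int → Option Int) → ((Int → Option Int) × Int)
  | 0, _, _, _, a => (a, 0)
  | fuel+1, l, r, i, a =>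
    if l = r then
      let v := PySem.List.pyGetD arr l 0           -- a[i] = arr[left] (index always in range)
      (fun j => if j = i then some v else a j, v)
    else
      let mid := PySem.Int.floordiv (l + r) 2
      let L := stBuild arr fuel l mid (i*2+1) a
      let R := stBuild arr fuel (mid+1) r (i*2+2) L.1
      (fun j => if j = i then some (L.2 + R.2) else R.1 j, L.2 + R.2)

-- SumTree.get_sum.  The query cache is omitted: it is pure memoization with no observable
-- effect on the result.  a[i] is read only at nodes build has set, hence the .getD 0.
def stQuery (a : Int → Option Int) (left right : Int) : Nat → Int → Int → Int → Int
  | 0, _, _, _ => 0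
  | fuel+1, sl, sr, i =>
    if sr < sl ∨ right < sl ∨ sr < left then 0
    else if left ≤ sl ∧ sr ≤ right then (a i).getD 0
    else
      let mid := PySem.Int.floordiv (sl + sr) 2
      stQuery a left right fuel sl mid (i*2+1) + stQuery a left right fuel (mid+1) sr (i*2+2)

def qrsA (hist : List Int) (n : Int) (a : Int → Option Int) (i j : Int) : Int :=
  if 0 ≤ i ∧ i < n ∧ 0 ≤ j ∧ j < n ∧ i ≤ j then stQuery a i j hist.length 0 (n-1) 0 else 0

def volumeA (hist : List Int) (n : Int) (leftGeq rightGeq : List (Option Int)) (a : Int → Option Int) (i : Int) : Int :=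
  -- "0 if j_left is None else …" is Option.elim
  let vl := (PySem.List.pyGetD leftGeq i none).elim 0
    (fun j => (i - j - 1) * min (PySem.List.pyGetD hist j 0) (PySem.List.pyGetD hist i 0) - qrsA hist n a (j+1) (i-1))
  let vr := (PySem.List.pyGetD rightGeq i none).elim 0
    (fun j => (j - i - 1) * min (PySem.List.pyGetD hist j 0) (PySem.List.pyGetD hist i 0) - qrsA hist n a (i+1) (j-1))
  max vl vr

-- n = len(hist) is written out as (hist.length : Int) throughout.
def search (hist : List Int) : Int :=
  if (hist.length : Int) ≤ 1 then 0
  else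
    -- max(volume(i) for i in range(n)); nonempty since n ≥ 2, so the .getD 0 is unreachable
    (PySem.List.max?
      ((PySem.List.pyRange 0 (hist.length : Int) 1).map
        (volumeA hist (hist.length : Int)
          -- left_geq = next_geq(hist[::-1]); left_geq.reverse(); each non-None x ↦ n-1-x
          (((nextGeq hist.reverse).reverse).map (fun o => o.map (fun x => (hist.length : Int) - 1 - x)))
          (nextGeq hist)
          (stBuild hist hist.length 0 ((hist.length : Int) - 1) 0 (fun _ => none)).1))
      (fun y => y)).getD 0

-- ===== PORT B =====

def prefixB (hist : List Int) : List Int :=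
  hist.foldl (fun p x => p ++ [PySem.List.pyGetD p (-1) 0 + x]) [0]   -- prefix.append(prefix[-1] + x)

def stepB (hist : List Int) (n : Int) (leftRaw rightGeq : List (Option Int)) (pre : List Int) (best : Int) (i : Int) : Int :=
  -- "if jl is not None: … if vl > best: best = vl" is Option.elim plus the conditional update
  let best := (PySem.List.pyGetD leftRaw i none).elim best
    (fun jl =>
      let j := n - 1 - jl
      let vl := (i - j - 1) * min (PySem.List.pyGetD hist j 0) (PySem.List.pyGetD hist i 0)
                  - (PySem.List.pyGetD pre i 0 - PySem.List.pyGetD pre (j+1) 0)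
      if best < vl then vl else best)
  (PySem.List.pyGetD rightGeq i none).elim best
    (fun jr =>
      let vr := (jr - i - 1) * min (PySem.List.pyGetD hist jr 0) (PySem.List.pyGetD hist i 0)
                  - (PySem.List.pyGetD pre jr 0 - PySem.List.pyGetD pre (i+1) 0)
      if best < vr then vr else best)

def search_alt (hist : List Int) : Int :=
  if (hist.length : Int) ≤ 1 then 0
  else
    (PySem.List.pyRange 0 (hist.length : Int) 1).foldl
      (stepB hist (hist.length : Int) ((nextGeq hist.reverse).reverse) (nextGeq hist) (prefixB hist)) 0

-- ===== PRECONDITION & SPEC =====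
def Spec_search (hist : List Int) (out : Int) : Prop := out = search_alt hist
instance (hist : List Int) (out : Int) : Decidable (Spec_search hist out) := by unfold Spec_search; infer_instance

-- ===== CLAIM (what is proved, stated in full; the proofs are below) =====
def Claim_equal_search : Prop := ∀ (hist : List Int), Dom_search hist → Spec_search hist (search hist)

-- ===== LEMMAS AND PROOFS =====

-- prefix sums as a specification
def S (hist : List Int) (k : Int) : Int := (hist.take k.toNat).sum

-- heap-index subtrees
def followPath : Int → List Bool → Int
  | i, [] => i
  | i, false :: p => followPath (i*2 + 1) p
  | i, true :: p => followPath (i*2 + 2) p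

def bval : List Bool → Int
  | [] => 0
  | false :: p => bval p
  | true :: p => 2 ^ p.length + bval p

def inSub (i j : Int) : Prop := ∃ p, followPath i p = j

-- the tree invariant established by build and consumed by query
inductive Good (hist : List Int) (a : Int → Option Int) : Int → Int → Int → Prop
  | leaf (l i : Int) : a i = some (S hist (l+1) - S hist l) → Good hist a l l i
  | node (l r i : Int) : l < r →
      a i = some (S hist (r+1) - S hist l) →
      Good hist a l (PySem.Int.floordiv (l+r) 2) (i*2+1) →
      Good hist a (PySem.Int.floordiv (l+r) 2 + 1) r (i*2+2) →
      Good hist a l r i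

lemma midf (l r : Int) : PySem.Int.floordiv (l + r) 2 = (l + r) / 2 :=
  PySem.Int.floordiv_eq_ediv_of_pos (by norm_num)

lemma bval_bounds (p : List Bool) : 0 ≤ bval p ∧ bval p < 2 ^ p.length := by
  induction p with
  | nil => simp [bval]
  | cons b p ih =>
    have h2 : (0:Int) < 2 ^ p.length := by positivity
    have hpow : (2:Int) ^ (p.length + 1) = 2 ^ p.length * 2 := pow_succ 2 p.length
    cases b <;> simp only [bval, List.length_cons] <;> constructor <;> linarith [ih.1, ih.2]

lemma follow_encode (p : List Bool) : ∀ i : Int, followPath i p = (i + 1) * 2 ^ p.length + bval p - 1 := by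
  induction p with
  | nil => intro i; simp [followPath, bval]
  | cons b p ih =>
    intro i
    cases b <;> simp only [followPath, bval, List.length_cons] <;> rw [ih] <;> ring

lemma inSub_self (i : Int) : inSub i i := ⟨[], rfl⟩

lemma inSub_left {i j : Int} : inSub (i*2+1) j → inSub i j := by
  rintro ⟨p, hp⟩; exact ⟨false :: p, by simpa [followPath] using hp⟩

lemma inSub_right {i j : Int} : inSub (i*2+2) j → inSub i j := by
  rintro ⟨p, hp⟩; exact ⟨true :: p, by simpa [followPath] using hp⟩

lemma inSub_ge {i j : Int} (hi : 0 ≤ i) (h : inSub i j) : i ≤ j := by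
  obtain ⟨p, hp⟩ := h
  rw [follow_encode] at hp
  have hb := bval_bounds p
  have h1 : (1:Int) ≤ 2 ^ p.length := one_le_pow₀ (by norm_num)
  nlinarith [hb.1, hb.2]

lemma sub_disjoint {i j : Int} (hi : 0 ≤ i) : inSub (i*2+1) j → inSub (i*2+2) j → False := by
  rintro ⟨p, hp⟩ ⟨q, hq⟩
  rw [follow_encode] at hp hq
  have hbp := bval_bounds p
  have hbq := bval_bounds q
  have hpq : (i*2+1+1) * 2 ^ p.length + bval p = (i*2+2+1) * 2 ^ q.length + bval q := by omega
  rcases lt_trichotomy p.length q.length with h | h | h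
  · have hle : (2:Int) ^ (p.length + 1) ≤ 2 ^ q.length := pow_le_pow_right₀ (by norm_num) (by omega)
    have hpow : (2:Int) ^ (p.length + 1) = 2 ^ p.length * 2 := pow_succ 2 p.length
    have h1 : (0:Int) < 2 ^ p.length := by positivity
    have hik : 0 ≤ i * 2 ^ p.length := mul_nonneg hi h1.le
    have key : (i*2+3) * (2 ^ p.length * 2) ≤ (i*2+3) * 2 ^ q.length :=
      mul_le_mul_of_nonneg_left (hpow ▸ hle) (by linarith)
    nlinarith [hbp.1, hbp.2, hbq.1]
  · rw [h] at hpq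
    have h1 : (0:Int) < 2 ^ q.length := by positivity
    nlinarith [hbp.2, hbq.1, hbp.1, hbq.2]
  · have hle : (2:Int) ^ (q.length + 1) ≤ 2 ^ p.length := pow_le_pow_right₀ (by norm_num) (by omega)
    have hpow : (2:Int) ^ (q.length + 1) = 2 ^ q.length * 2 := pow_succ 2 q.length
    have h1 : (0:Int) < 2 ^ q.length := by positivity
    have hik : 0 ≤ i * 2 ^ q.length := mul_nonneg hi h1.le
    have key : (i*2+2) * (2 ^ q.length * 2) ≤ (i*2+2) * 2 ^ p.length :=
      mul_le_mul_of_nonneg_left (hpow ▸ hle) (by linarith)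
    nlinarith [hbp.1, hbq.1, hbq.2]

lemma good_frame {hist : List Int} {a b : Int → Option Int} :
    ∀ {l r i : Int}, Good hist a l r i → (∀ j, inSub i j → b j = a j) → Good hist b l r i := by
  intro l r i g
  induction g with
  | leaf l i ha =>
    intro h
    exact Good.leaf l i (by rw [h i (inSub_self i)]; exact ha)
  | node l r i hlt ha gL gR ihL ihR =>
    intro h
    exact Good.node l r i hlt (by rw [h i (inSub_self i)]; exact ha)
      (ihL fun j hj => h j (inSub_left hj))
      (ihR fun j hj => h j (inSub_right hj))

lemma S_succ (hist : List Int) (k : Int) (h0 : 0 ≤ k) (hk : k < (hist.length : Int)) :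
    S hist (k + 1) = S hist k + PySem.List.pyGetD hist k 0 := by
  have hk' : k.toNat < hist.length := by omega
  unfold S
  have h1 : (k + 1).toNat = k.toNat + 1 := by omega
  rw [h1, List.take_succ, List.sum_append, PySem.List.pyGetD_eq_getElem hist 0 h0 hk]
  simp [List.getElem?_eq_getElem hk']

theorem build_ok (hist : List Int) :
    ∀ (fuel : Nat) (l r i : Int) (a : Int → Option Int),
      0 ≤ l → l ≤ r → r < (hist.length : Int) → 0 ≤ i → (r - l).toNat < fuel →
      (stBuild hist fuel l r i a).2 = S hist (r + 1) - S hist l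
      ∧ Good hist (stBuild hist fuel l r i a).1 l r i
      ∧ ∀ j, ¬ inSub i j → (stBuild hist fuel l r i a).1 j = a j := by
  intro fuel
  induction fuel with
  | zero => intro l r i a _ _ _ _ hf; omega
  | succ fuel ih =>
    intro l r i a hl hlr hr hi hf
    by_cases heq : l = r
    · subst heq
      simp only [stBuild, if_pos rfl]
      refine ⟨?_, ?_, ?_⟩
      · show PySem.List.pyGetD hist l 0 = S hist (l+1) - S hist l
        rw [S_succ hist l hl hr]; ring
      · refine Good.leaf l i ?_
        show (if i = i then some (PySem.List.pyGetD hist l 0) else a i) = _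
        rw [if_pos rfl, S_succ hist l hl hr]
        congr 1; ring
      · intro j hj
        have hji : j ≠ i := fun h => hj (h ▸ inSub_self i)
        show (if j = i then _ else a j) = a j
        rw [if_neg hji]
    · have hlr' : l < r := lt_of_le_of_ne hlr heq
      have hmid := midf l r
      have hm1 : l ≤ PySem.Int.floordiv (l + r) 2 := by rw [hmid]; omega
      have hm2 : PySem.Int.floordiv (l + r) 2 < r := by rw [hmid]; omega
      simp only [stBuild, if_neg heq]
      obtain ⟨hLs, hLg, hLf⟩ := ih l (PySem.Int.floordiv (l + r) 2) (i*2+1) a hl hm1 (by omega) (by omega) (by omega)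
      obtain ⟨hRs, hRg, hRf⟩ := ih (PySem.Int.floordiv (l + r) 2 + 1) r (i*2+2)
        (stBuild hist fuel l (PySem.Int.floordiv (l + r) 2) (i*2+1) a).1 (by omega) (by omega) hr (by omega) (by omega)
      have hisub1 : ¬ inSub (i*2+1) i := fun h => by have := inSub_ge (by omega) h; omega
      have hisub2 : ¬ inSub (i*2+2) i := fun h => by have := inSub_ge (by omega) h; omega
      refine ⟨?_, ?_, ?_⟩
      · show _ + _ = _
        rw [hLs, hRs]; ring
      · refine Good.node l r i hlr' ?_ ?_ ?_
        · show (if i = i then some (_ + _) else _) = _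
          rw [if_pos rfl, hLs, hRs]
          congr 1; ring
        · refine good_frame hLg ?_
          intro j hj
          have hji : j ≠ i := fun h => hisub1 (h ▸ hj)
          have hj2 : ¬ inSub (i*2+2) j := fun h2 => sub_disjoint hi hj h2
          show (if j = i then _ else _) = _
          rw [if_neg hji]
          exact hRf j hj2
        · refine good_frame hRg ?_
          intro j hj
          have hji : j ≠ i := fun h => hisub2 (h ▸ hj)
          show (if j = i then _ else _) = _
          rw [if_neg hji]
      · intro j hj
        have hji : j ≠ i := fun h => hj (h ▸ inSub_self i)
        have hj1 : ¬ inSub (i*2+1) j := fun h => hj (inSub_left h)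
        have hj2 : ¬ inSub (i*2+2) j := fun h => hj (inSub_right h)
        show (if j = i then _ else _) = a j
        rw [if_neg hji, hRf j hj2, hLf j hj1]

theorem query_ok (hist : List Int) {a : Int → Option Int} (l r : Int) (hlr : l ≤ r) :
    ∀ {sl sr i : Int}, Good hist a sl sr i →
      ∀ fuel : Nat, (sr - sl).toNat < fuel →
      stQuery a l r fuel sl sr i =
        if max l sl ≤ min r sr then S hist (min r sr + 1) - S hist (max l sl) else 0 := by
  intro sl sr i g
  induction g with
  | leaf s i ha =>
    intro fuel hf
    cases fuel with
    | zero => omega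
    | succ fuel =>
      simp only [stQuery]
      by_cases hdis : s < s ∨ r < s ∨ s < l
      · rw [if_pos hdis, if_neg (by rcases hdis with h|h|h <;> omega)]
      · rw [if_neg hdis]
        push_neg at hdis
        rw [if_pos (by omega : l ≤ s ∧ s ≤ r), ha]
        have e1 : max l s = s := by omega
        have e2 : min r s = s := by omega
        rw [e1, e2, if_pos (le_refl s)]
        simp
  | node sl sr i hlt ha gL gR ihL ihR =>
    intro fuel hf
    cases fuel with
    | zero => omega
    | succ fuel =>
      have hmid := midf sl sr
      have hm1 : sl ≤ PySem.Int.floordiv (sl + sr) 2 := by rw [hmid]; omega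
      have hm2 : PySem.Int.floordiv (sl + sr) 2 < sr := by rw [hmid]; omega
      simp only [stQuery]
      by_cases hdis : sr < sl ∨ r < sl ∨ sr < l
      · rw [if_pos hdis, if_neg (by rcases hdis with h|h|h <;> omega)]
      · rw [if_neg hdis]
        push_neg at hdis
        by_cases hcov : l ≤ sl ∧ sr ≤ r
        · rw [if_pos hcov, ha]
          have e1 : max l sl = sl := by omega
          have e2 : min r sr = sr := by omega
          rw [e1, e2, if_pos (by omega)]
          simp
        · rw [if_neg hcov]
          rw [ihL fuel (by omega), ihR fuel (by omega)]
          by_cases hc : r ≤ PySem.Int.floordiv (sl + sr) 2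
          · rw [if_pos (show max l sl ≤ min r (PySem.Int.floordiv (sl + sr) 2) by omega),
                if_neg (show ¬ max l (PySem.Int.floordiv (sl + sr) 2 + 1) ≤ min r sr by omega),
                if_pos (show max l sl ≤ min r sr by omega)]
            have e1 : min r (PySem.Int.floordiv (sl + sr) 2) = min r sr := by omega
            rw [e1]; ring
          · by_cases hc2 : l ≤ PySem.Int.floordiv (sl + sr) 2
            · rw [if_pos (show max l sl ≤ min r (PySem.Int.floordiv (sl + sr) 2) by omega),
                  if_pos (show max l (PySem.Int.floordiv (sl + sr) 2 + 1) ≤ min r sr by omega),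
                  if_pos (show max l sl ≤ min r sr by omega)]
              have e1 : min r (PySem.Int.floordiv (sl + sr) 2) = PySem.Int.floordiv (sl + sr) 2 := by omega
              have e2 : max l (PySem.Int.floordiv (sl + sr) 2 + 1) = PySem.Int.floordiv (sl + sr) 2 + 1 := by omega
              rw [e1, e2]; ring
            · rw [if_neg (show ¬ max l sl ≤ min r (PySem.Int.floordiv (sl + sr) 2) by omega),
                  if_pos (show max l (PySem.Int.floordiv (sl + sr) 2 + 1) ≤ min r sr by omega),
                  if_pos (show max l sl ≤ min r sr by omega)]
              have e2 : max l (PySem.Int.floordiv (sl + sr) 2 + 1) = max l sl := by omega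
              rw [e2]; ring

lemma qrs_gen (hist : List Int) {a : Int → Option Int}
    (hg : Good hist a 0 ((hist.length : Int) - 1) 0) (hn : 2 ≤ hist.length)
    {u w : Int} (h1 : 1 ≤ u) (h2 : u ≤ w + 1) (h3 : w ≤ (hist.length : Int) - 2) :
    qrsA hist (hist.length : Int) a u w = S hist (w + 1) - S hist u := by
  unfold qrsA
  by_cases hc : u ≤ w
  · rw [if_pos ⟨by omega, by omega, by omega, by omega, hc⟩]
    rw [query_ok hist u w hc hg hist.length (by omega)]
    have e1 : max u 0 = u := by omega
    have e2 : min w ((hist.length : Int) - 1) = w := by omega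
    rw [e1, e2, if_pos (by omega)]
  · rw [if_neg (fun hh => hc hh.2.2.2.2)]
    have hu : u = w + 1 := by omega
    rw [hu]; ring

lemma prefix_snoc (d : List Int) (x : Int) :
    (List.range (d.length + 1)).map (fun m => (d.take m).sum) ++ [d.sum + x] =
    (List.range (d.length + 1 + 1)).map (fun m => ((d ++ [x]).take m).sum) := by
  conv_rhs => rw [List.range_succ, List.map_append]
  congr 1
  · refine List.map_congr_left ?_
    intro m hm
    rw [List.take_append_of_le_length (Nat.lt_succ_iff.mp (List.mem_range.mp hm))]
  · have hlen : (d ++ [x]).length = d.length + 1 := by simp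
    simp only [List.map_cons, List.map_nil, ← hlen, List.take_length]
    simp

lemma prefixB_eq (hist : List Int) :
    prefixB hist = (List.range (hist.length + 1)).map (fun m => (hist.take m).sum) := by
  induction hist using List.reverseRecOn with
  | nil => simp [prefixB]
  | append_singleton ys y ih =>
    have hstep : prefixB (ys ++ [y]) = prefixB ys ++ [PySem.List.pyGetD (prefixB ys) (-1) 0 + y] := by
      unfold prefixB
      rw [List.foldl_append, List.foldl_cons, List.foldl_nil]
    rw [hstep, ih]
    have hlast : PySem.List.pyGetD ((List.range (ys.length + 1)).map (fun m => (ys.take m).sum)) (-1) 0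
        = (ys.take ys.length).sum := by
      rw [List.range_succ, List.map_append]
      exact PySem.List.pyGetD_neg_one_append_singleton _ _ _
    rw [hlast, List.take_length]
    have := prefix_snoc ys y
    simpa using this

lemma pre_get (hist : List Int) {k : Int} (h0 : 0 ≤ k) (hk : k ≤ (hist.length : Int)) :
    PySem.List.pyGetD (prefixB hist) k 0 = S hist k := by
  rw [prefixB_eq, PySem.List.pyGetD_of_nonneg _ _ h0,
      PySem.List.getD_map_range _ _ _ _ (by omega)]
  rfl

lemma ngPop_inv (arr : List Int) (x m : Int) :
    ∀ (s : List Int) (r : List (Option Int)),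
      (∀ e ∈ s, 0 ≤ e ∧ e < m) →
      (∀ (k : Nat) (v : Int), r[k]? = some (some v) → (k : Int) < v ∧ v ≤ m) →
      r.length = arr.length →
      (∀ e ∈ (ngPop arr x m s r).1, 0 ≤ e ∧ e < m) ∧
      (∀ (k : Nat) (v : Int), (ngPop arr x m s r).2[k]? = some (some v) → (k : Int) < v ∧ v ≤ m) ∧
      (ngPop arr x m s r).2.length = arr.length := by
  intro s
  induction s with
  | nil =>
    intro r hs hr hl
    simp only [ngPop]
    exact ⟨by simp, hr, hl⟩
  | cons t s ih =>
    intro r hs hr hl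
    have ht := hs t (by simp)
    by_cases hc : PySem.List.pyGetD arr t 0 ≤ x
    · simp only [ngPop, if_pos hc]
      refine ih _ (fun e he => hs e (List.mem_cons_of_mem _ he)) ?_ ?_
      · intro k v hkv
        rw [PySem.List.pySetD_of_nonneg _ _ ht.1, List.getElem?_set] at hkv
        by_cases hk : t.toNat = k
        · rw [if_pos hk] at hkv
          by_cases hlen : t.toNat < r.length
          · rw [if_pos hlen] at hkv
            simp only [Option.some.injEq] at hkv
            subst hk
            omega
          · rw [if_neg hlen] at hkv
            exact absurd hkv (by simp)
        · rw [if_neg hk] at hkv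
          exact hr k v hkv
      · rw [PySem.List.length_pySetD]; exact hl
    · simp only [ngPop, if_neg hc]
      exact ⟨hs, hr, hl⟩

lemma fold_inv (arr : List Int) :
    ∀ (xs : List Int) (m : Int) (s : List Int) (r : List (Option Int)),
      0 ≤ m →
      (∀ e ∈ s, 0 ≤ e ∧ e < m) →
      (∀ (k : Nat) (v : Int), r[k]? = some (some v) → (k : Int) < v ∧ v ≤ m - 1) →
      r.length = arr.length →
      (∀ (k : Nat) (v : Int),
          ((PySem.List.enumerate xs m).foldl
            (fun st p =>
              let q := ngPop arr p.2 p.1 st.1 st.2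
              (p.1 :: q.1, q.2)) (s, r)).2[k]? = some (some v) →
          (k : Int) < v ∧ v ≤ m + (xs.length : Int) - 1) ∧
      ((PySem.List.enumerate xs m).foldl
            (fun st p =>
              let q := ngPop arr p.2 p.1 st.1 st.2
              (p.1 :: q.1, q.2)) (s, r)).2.length = arr.length := by
  intro xs
  induction xs with
  | nil =>
    intro m s r hm hs hr hl
    simp only [PySem.List.enumerate_nil, List.foldl_nil, List.length_nil, Nat.cast_zero]
    exact ⟨fun k v h => ⟨(hr k v h).1, by have := (hr k v h).2; omega⟩, hl⟩
  | cons x xs ih =>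
    intro m s r hm hs hr hl
    rw [PySem.List.enumerate_cons, List.foldl_cons]
    obtain ⟨hs', hr', hl'⟩ := ngPop_inv arr x m s r hs
      (fun k v h => by have := hr k v h; exact ⟨this.1, by omega⟩) hl
    have hnext := ih (m+1) (m :: (ngPop arr x m s r).1) (ngPop arr x m s r).2 (by omega)
      (by
        intro e he
        rcases List.mem_cons.mp he with h | h
        · subst h; exact ⟨hm, by omega⟩
        · have := hs' e h; exact ⟨this.1, by omega⟩)
      (fun k v h => by have := hr' k v h; exact ⟨this.1, by omega⟩)
      hl'
    refine ⟨fun k v h => ?_, ?_⟩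
    · have h2 := hnext.1 k v (by exact h)
      refine ⟨h2.1, ?_⟩
      have hxx : ((x :: xs).length : Int) = (xs.length : Int) + 1 := by simp
      omega
    · exact hnext.2

lemma nextGeq_bound (arr : List Int) (h : arr ≠ []) :
    (nextGeq arr).length = arr.length ∧
    ∀ (k : Nat) (v : Int), (nextGeq arr)[k]? = some (some v) → (k : Int) < v ∧ v < (arr.length : Int) := by
  have hlen0 : 0 < arr.length := List.length_pos_iff.mpr h
  have hent : ∀ (k : Nat) (v : Int),
      (List.replicate arr.length (none : Option Int))[k]? = some (some v) → (k : Int) < v ∧ v ≤ 1 - 1 := by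
    intro k v hkv
    rw [List.getElem?_replicate] at hkv
    split at hkv <;> simp_all
  have hmain := fold_inv arr (arr.drop 1) 1 [0] (List.replicate arr.length none) (by norm_num)
    (by simp) hent (by simp)
  have hdl : ((arr.drop 1).length : Int) = (arr.length : Int) - 1 := by
    rw [List.length_drop]; omega
  unfold nextGeq
  refine ⟨hmain.2, fun k v hkv => ?_⟩
  have h2 := hmain.1 k v hkv
  exact ⟨h2.1, by omega⟩

lemma nextGeq_last (arr : List Int) (h : arr ≠ []) :
    (nextGeq arr)[arr.length - 1]? = some none := by
  obtain ⟨hlen, hb⟩ := nextGeq_bound arr h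
  have hlen0 : 0 < arr.length := List.length_pos_iff.mpr h
  have hk : arr.length - 1 < (nextGeq arr).length := by omega
  rcases ho : (nextGeq arr)[arr.length - 1]? with _ | o
  · rw [List.getElem?_eq_none_iff] at ho; omega
  · cases o with
    | none => rfl
    | some v =>
      have := hb (arr.length - 1) v ho
      omega

lemma lookup_some {xs : List (Option Int)} {i : Int} {v : Int}
    (h0 : 0 ≤ i) (hi : i.toNat < xs.length)
    (h : PySem.List.pyGetD xs i none = some v) : xs[i.toNat]? = some (some v) := by
  rw [PySem.List.pyGetD_of_nonneg _ _ h0, List.getD_eq_getElem?_getD,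
      List.getElem?_eq_getElem hi] at h
  rw [List.getElem?_eq_getElem hi]
  simpa using h

lemma right_lookup (hist : List Int) (hn : 2 ≤ hist.length) {i : Int}
    (h0 : 0 ≤ i) (hi : i < (hist.length : Int)) {jr : Int}
    (h : PySem.List.pyGetD (nextGeq hist) i none = some jr) :
    i < jr ∧ jr < (hist.length : Int) := by
  have hne : hist ≠ [] := by intro hh; rw [hh] at hn; simp at hn
  obtain ⟨hlen, hb⟩ := nextGeq_bound hist hne
  have hi' : i.toNat < (nextGeq hist).length := by omega
  have := hb i.toNat jr (lookup_some h0 hi' h)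
  omega

lemma left_lookup (hist : List Int) (hn : 2 ≤ hist.length) {i : Int}
    (h0 : 0 ≤ i) (hi : i < (hist.length : Int)) {jl : Int}
    (h : PySem.List.pyGetD ((nextGeq hist.reverse).reverse) i none = some jl) :
    0 ≤ (hist.length : Int) - 1 - jl ∧ (hist.length : Int) - 1 - jl < i := by
  have hne : hist.reverse ≠ [] := by
    intro hh
    have : hist = [] := by simpa using congrArg List.reverse hh
    rw [this] at hn; simp at hn
  obtain ⟨hlen, hb⟩ := nextGeq_bound hist.reverse hne
  have hrl : hist.reverse.length = hist.length := List.length_reverse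
  have hi' : i.toNat < ((nextGeq hist.reverse).reverse).length := by
    rw [List.length_reverse, hlen, hrl]; omega
  have h2 := lookup_some h0 hi' h
  rw [List.getElem?_reverse (by rw [hlen, hrl]; omega)] at h2
  have := hb ((nextGeq hist.reverse).length - 1 - i.toNat) jl h2
  rw [hlen, hrl] at this
  omega

lemma left_none0 (hist : List Int) (hn : 2 ≤ hist.length) :
    PySem.List.pyGetD ((nextGeq hist.reverse).reverse) 0 none = none := by
  have hne : hist.reverse ≠ [] := by
    intro hh
    have : hist = [] := by simpa using congrArg List.reverse hh
    rw [this] at hn; simp at hn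
  obtain ⟨hlen, _⟩ := nextGeq_bound hist.reverse hne
  have hrl : hist.reverse.length = hist.length := List.length_reverse
  have h' : ((nextGeq hist.reverse).reverse)[(0:Nat)]? = some none := by
    rw [List.getElem?_reverse (by rw [hlen, hrl]; omega)]
    have he : (nextGeq hist.reverse).length - 1 - 0 = hist.reverse.length - 1 := by rw [hlen]; omega
    rw [he]
    exact nextGeq_last hist.reverse hne
  rw [PySem.List.pyGetD_of_nonneg _ _ le_rfl]
  simp only [Int.toNat_zero]
  rw [List.getD_eq_getElem?_getD, h']
  rfl

lemma step_eq (hist : List Int) (hn : 2 ≤ hist.length) {a : Int → Option Int}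
    (hg : Good hist a 0 ((hist.length : Int) - 1) 0)
    (i best : Int) (hb : 0 ≤ best) (h0 : 0 ≤ i) (hi : i < (hist.length : Int)) :
    stepB hist (hist.length : Int) ((nextGeq hist.reverse).reverse) (nextGeq hist) (prefixB hist) best i
      = max best
          (volumeA hist (hist.length : Int)
            (((nextGeq hist.reverse).reverse).map (fun o => o.map (fun x => (hist.length : Int) - 1 - x)))
            (nextGeq hist) a i) := by
  have hmapL : PySem.List.pyGetD
        (((nextGeq hist.reverse).reverse).map (fun o => o.map (fun x => (hist.length : Int) - 1 - x))) i none
      = Option.map (fun x => (hist.length : Int) - 1 - x)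
          (PySem.List.pyGetD ((nextGeq hist.reverse).reverse) i none) := by
    have := PySem.List.pyGetD_map (Option.map (fun x => (hist.length : Int) - 1 - x))
      ((nextGeq hist.reverse).reverse) i none
    simpa using this
  unfold stepB volumeA
  rw [hmapL]
  rcases hL : PySem.List.pyGetD ((nextGeq hist.reverse).reverse) i none with _ | jl
  · rcases hR : PySem.List.pyGetD (nextGeq hist) i none with _ | jr
    · simp only [Option.map_none, Option.elim_none]
      omega
    · simp only [Option.map_none, Option.elim_none, Option.elim_some]
      obtain ⟨hr1, hr2⟩ := right_lookup hist hn h0 hi hR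
      have hqr : qrsA hist (hist.length : Int) a (i+1) (jr-1) = S hist jr - S hist (i+1) := by
        have := qrs_gen hist hg hn (u := i+1) (w := jr-1) (by omega) (by omega) (by omega)
        rw [show jr - 1 + 1 = jr from by ring] at this
        exact this
      rw [hqr, pre_get hist (by omega : (0:Int) ≤ jr) (by omega),
          pre_get hist (by omega : (0:Int) ≤ i+1) (by omega)]
      split_ifs <;> omega
  · simp only [Option.map_some, Option.elim_some]
    obtain ⟨hl1, hl2⟩ := left_lookup hist hn h0 hi hL
    have hql : qrsA hist (hist.length : Int) a ((hist.length : Int) - 1 - jl + 1) (i-1)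
        = S hist i - S hist ((hist.length : Int) - 1 - jl + 1) := by
      have := qrs_gen hist hg hn (u := (hist.length : Int) - 1 - jl + 1) (w := i-1)
        (by omega) (by omega) (by omega)
      rw [show i - 1 + 1 = i from by ring] at this
      exact this
    rcases hR : PySem.List.pyGetD (nextGeq hist) i none with _ | jr
    · simp only [Option.elim_none]
      rw [hql, pre_get hist (by omega : (0:Int) ≤ i) (by omega),
          pre_get hist (by omega : (0:Int) ≤ (hist.length : Int) - 1 - jl + 1) (by omega)]
      split_ifs <;> omega
    · obtain ⟨hr1, hr2⟩ := right_lookup hist hn h0 hi hR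
      have hqr : qrsA hist (hist.length : Int) a (i+1) (jr-1) = S hist jr - S hist (i+1) := by
        have := qrs_gen hist hg hn (u := i+1) (w := jr-1) (by omega) (by omega) (by omega)
        rw [show jr - 1 + 1 = jr from by ring] at this
        exact this
      simp only [Option.elim_some]
      rw [hql, hqr, pre_get hist (by omega : (0:Int) ≤ i) (by omega),
          pre_get hist (by omega : (0:Int) ≤ (hist.length : Int) - 1 - jl + 1) (by omega),
          pre_get hist (by omega : (0:Int) ≤ jr) (by omega),
          pre_get hist (by omega : (0:Int) ≤ i+1) (by omega)]
      split_ifs <;> omega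

lemma fold_step (hist : List Int) (hn : 2 ≤ hist.length) {a : Int → Option Int}
    (hg : Good hist a 0 ((hist.length : Int) - 1) 0) :
    ∀ (L : List Int) (b : Int), 0 ≤ b → (∀ i ∈ L, 0 ≤ i ∧ i < (hist.length : Int)) →
      L.foldl (stepB hist (hist.length : Int) ((nextGeq hist.reverse).reverse) (nextGeq hist) (prefixB hist)) b
        = (L.map (volumeA hist (hist.length : Int)
            (((nextGeq hist.reverse).reverse).map (fun o => o.map (fun x => (hist.length : Int) - 1 - x)))
            (nextGeq hist) a)).foldl max b := by
  intro L
  induction L with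
  | nil => intro b _ _; simp
  | cons i L ih =>
    intro b hb hmem
    rw [List.map_cons, List.foldl_cons, List.foldl_cons,
        step_eq hist hn hg i b hb (hmem i (by simp)).1 (hmem i (by simp)).2]
    exact ih _ (le_trans hb (le_max_left _ _)) (fun j hj => hmem j (List.mem_cons_of_mem _ hj))

-- ===== VERDICT (by name: the statement is the Claim_ definition above) =====
theorem search_spec : Claim_equal_search := by
  intro hist _
  unfold Spec_search search search_alt
  by_cases hle : (hist.length : Int) ≤ 1
  · simp only [if_pos hle]
  · simp only [if_neg hle]
    have hn : 2 ≤ hist.length := by omega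
    obtain ⟨_, hg, _⟩ := build_ok hist hist.length 0 ((hist.length : Int) - 1) 0 (fun _ => none)
      le_rfl (by omega) (by omega) le_rfl (by omega)
    rw [PySem.List.pyRange_one_cons (by omega : (0:Int) < (hist.length : Int))]
    rw [List.map_cons, PySem.List.max?_id_cons, Option.getD_some]
    rw [List.foldl_cons, step_eq hist hn hg 0 0 le_rfl le_rfl (by omega)]
    have hv0 : 0 ≤ volumeA hist (hist.length : Int)
        (((nextGeq hist.reverse).reverse).map (fun o => o.map (fun x => (hist.length : Int) - 1 - x)))
        (nextGeq hist)
        (stBuild hist hist.length 0 ((hist.length : Int) - 1) 0 (fun _ => none)).1 0 := by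
      unfold volumeA
      have hmapL : PySem.List.pyGetD
            (((nextGeq hist.reverse).reverse).map (fun o => o.map (fun x => (hist.length : Int) - 1 - x))) 0 none
          = Option.map (fun x => (hist.length : Int) - 1 - x)
              (PySem.List.pyGetD ((nextGeq hist.reverse).reverse) 0 none) := by
        have := PySem.List.pyGetD_map (Option.map (fun x => (hist.length : Int) - 1 - x))
          ((nextGeq hist.reverse).reverse) 0 none
        simpa using this
      rw [hmapL, left_none0 hist hn]
      simp only [Option.map_none, Option.elim_none]
      exact le_max_left 0 _
    rw [max_eq_right hv0]
    rw [fold_step hist hn hg _ _ hv0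
      (fun j hj => by
        have := PySem.List.mem_pyRange_one.mp hj
        omega)]
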